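-- pv_equiv track=rewrite | github.com/pengboci/M3GQA | codes/singlehop_setting.py | check_single
-- ===== SOURCE A (Python) =====
-- def check_single(graph, answer, topic_entities, relation):
--     entity_set = []
--     for x in graph:
--         entity_set.append(x[0])
--         entity_set.append(x[2])
--
--     entity_set = list(set(entity_set))
--
--     answers = []
--
--     for entity in entity_set:
--         cnt = 0
--         for start, relationship, end in graph:
--             if end != entity:
--                 continue
--             if start in topic_entities and relationship == relation:
--                 cnt += 1
--
--         if cnt == len(topic_entities):
--             answers.append(entity)
--
--     answers = list(set(answers))
--     if len(answers) == 1 and answers[0] == answer: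
--         return True
--
--     return False
-- ===== SOURCE B (Python) =====
-- def check_single(graph, answer, topic_entities, relation):
--     k = len(topic_entities)
--     topics = set(topic_entities)
--     ents = set()
--     cnt = {}
--     for s, r, e in graph:
--         ents.add(s)
--         ents.add(e)
--         if r == relation and s in topics:
--             cnt[e] = cnt.get(e, 0) + 1
--     matched = [e for e in ents if cnt.get(e, 0) == k]
--     return len(matched) == 1 and matched[0] == answer
-- ===== Notes on version B (the rewrite author's own statement) =====
-- stated objective: faster
-- what changed: Replaces the per-entity rescan of the whole edge list by a single pass over the graph that builds the set of entities and a dict counting matching in-edges per end entity.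
import Mathlib
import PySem

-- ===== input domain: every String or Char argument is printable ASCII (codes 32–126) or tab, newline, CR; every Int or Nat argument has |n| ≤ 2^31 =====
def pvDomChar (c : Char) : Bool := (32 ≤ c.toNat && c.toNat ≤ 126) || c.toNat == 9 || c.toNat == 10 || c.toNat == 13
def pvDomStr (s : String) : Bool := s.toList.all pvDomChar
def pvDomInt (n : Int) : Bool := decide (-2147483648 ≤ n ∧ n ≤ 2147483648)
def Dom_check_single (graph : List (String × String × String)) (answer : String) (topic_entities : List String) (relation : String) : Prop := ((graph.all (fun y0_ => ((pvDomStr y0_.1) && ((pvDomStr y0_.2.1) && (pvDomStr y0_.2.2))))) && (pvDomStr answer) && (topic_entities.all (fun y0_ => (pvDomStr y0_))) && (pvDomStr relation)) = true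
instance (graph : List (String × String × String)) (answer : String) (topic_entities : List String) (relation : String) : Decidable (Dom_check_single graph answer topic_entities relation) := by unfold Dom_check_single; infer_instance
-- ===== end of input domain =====

-- B replaces A's per-entity rescan of all edges by one pass over the graph
-- building the entity set and a per-end-entity match-count dict (objective: faster).

-- ===== PORT A =====
def check_single (graph : List (String × String × String)) (answer : String) (topic_entities : List String) (relation : String) : Bool :=
  -- entity_set = []; for x in graph: append x[0]; append x[2]
  let entity_set0 : List String := graph.foldl (fun acc x => acc ++ [x.1] ++ [x.2.2]) []
  -- entity_set = list(set(entity_set))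
  let entity_set : List String := PySem.Set.ofList entity_set0
  -- answers loop
  let answers : List String := entity_set.foldl (fun answers entity =>
    let cnt : Int := graph.foldl (fun cnt y =>
      if y.2.2 ≠ entity then cnt
      else if topic_entities.contains y.1 && y.2.1 == relation then cnt + 1 else cnt) 0
    if cnt == (topic_entities.length : Int) then answers ++ [entity] else answers) []
  -- answers = list(set(answers))
  let answers : List String := PySem.Set.ofList answers
  -- if len(answers) == 1 and answers[0] == answer: return True; return False
  if answers.length == 1 then
    match PySem.List.pyGet? answers 0 with
    | some a0 => a0 == answer
    | none => false
  else false

-- ===== PORT B =====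
def check_single_alt (graph : List (String × String × String)) (answer : String) (topic_entities : List String) (relation : String) : Bool :=
  let k : Int := topic_entities.length
  let topics : PySem.Set String := PySem.Set.ofList topic_entities
  -- single pass: ents.add(s); ents.add(e); conditional cnt[e] = cnt.get(e,0)+1
  let st : PySem.Set String × PySem.Dict String Int := graph.foldl
    (fun st x =>
      (PySem.Set.add (PySem.Set.add st.1 x.1) x.2.2,
       if x.2.1 == relation && PySem.Set.contains topics x.1 then
         st.2.insert x.2.2 (st.2.getD x.2.2 0 + 1)
       else st.2))
    (PySem.Set.empty, PySem.Dict.empty)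
  let matched : List String := st.1.filter (fun e => st.2.getD e 0 == k)
  matched.length == 1 && (matched.headD "" == answer)

-- ===== PRECONDITION & SPEC =====
def Spec_check_single (graph : List (String × String × String)) (answer : String) (topic_entities : List String) (relation : String) (out : Bool) : Prop := out = check_single_alt graph answer topic_entities relation
instance (graph : List (String × String × String)) (answer : String) (topic_entities : List String) (relation : String) (out : Bool) : Decidable (Spec_check_single graph answer topic_entities relation out) := by unfold Spec_check_single; infer_instance

-- ===== CLAIM (what is proved, stated in full; the proofs are below) =====
def Claim_equal_check_single : Prop := ∀ (graph : List (String × String × String)) (answer : String) (topic_entities : List String) (relation : String), Dom_check_single graph answer topic_entities relation → Spec_check_single graph answer topic_entities relation (check_single graph answer topic_entities relation)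

-- ===== LEMMAS AND PROOFS =====

-- the entity sets built by A (append-all-then-dedup) and B (incremental add) coincide
theorem ents_eq (graph : List (String × String × String)) (s : PySem.Set String) :
    PySem.Set.update s (graph.flatMap (fun x => [x.1] ++ [x.2.2])) =
    graph.foldl (fun s x => PySem.Set.add (PySem.Set.add s x.1) x.2.2) s := by
  induction graph generalizing s with
  | nil => simp [PySem.Set.update]
  | cons y ys ih =>
      rw [List.flatMap_cons, PySem.Set.update_append, List.foldl_cons, ← ih]
      congr 1

-- A's inner count over the graph equals a countP, as an Int
theorem cntA_eq (graph : List (String × String × String)) (topic_entities : List String) (relation entity : String) (c : Int) :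
    graph.foldl (fun cnt y =>
      if y.2.2 ≠ entity then cnt
      else if topic_entities.contains y.1 && y.2.1 == relation then cnt + 1 else cnt) c =
    c + (graph.countP (fun y => (y.2.1 == relation && topic_entities.contains y.1) && y.2.2 == entity) : Int) := by
  induction graph generalizing c with
  | nil => simp
  | cons y ys ih =>
      simp only [List.foldl_cons, List.countP_cons]
      by_cases he : y.2.2 = entity
      · by_cases hc : (topic_entities.contains y.1 && y.2.1 == relation) = true
        · rw [if_neg (by simp [he]), if_pos hc, ih]
          have hP : ((y.2.1 == relation && topic_entities.contains y.1) && y.2.2 == entity) = true := by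
            simp only [Bool.and_eq_true] at hc
            simp [hc.2, he, show y.1 ∈ topic_entities from by simpa using hc.1]
          rw [hP]; simp; ring
        · rw [if_neg (by simp [he]), if_neg hc, ih]
          have hP : ((y.2.1 == relation && topic_entities.contains y.1) && y.2.2 == entity) = false := by
            revert hc; cases h1 : topic_entities.contains y.1 <;> cases h2 : y.2.1 == relation <;> simp
          rw [hP]; simp
      · rw [if_pos (by simpa using he), ih]
        have hP : ((y.2.1 == relation && topic_entities.contains y.1) && y.2.2 == entity) = false := by
          simp [he]
        rw [hP]; simp

-- B's conditional counting fold: lookup after the fold counts the matching edges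
theorem cntB_eq (graph : List (String × String × String)) (topics : PySem.Set String) (relation : String)
    (d : PySem.Dict String Int) (e : String) :
    (graph.foldl (fun d x =>
        if x.2.1 == relation && PySem.Set.contains topics x.1 then
          d.insert x.2.2 (d.getD x.2.2 0 + 1)
        else d) d).getD e 0 =
    d.getD e 0 + (((graph.filter (fun x => x.2.1 == relation && PySem.Set.contains topics x.1)).map (·.2.2)).count e : Int) := by
  induction graph generalizing d with
  | nil => simp
  | cons y ys ih =>
      simp only [List.foldl_cons, List.filter_cons]
      by_cases hc : (y.2.1 == relation && PySem.Set.contains topics y.1) = true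
      · rw [if_pos hc, ih, if_pos hc]
        simp only [List.map_cons, List.count_cons, PySem.Dict.getD_insert]
        by_cases he : e = y.2.2
        · rw [if_pos he, if_pos (by simp [he])]
          subst he; push_cast; ring
        · rw [if_neg he, if_neg (by simp [Ne.symm he])]
          simp
      · rw [if_neg hc, ih, if_neg hc]

-- the pair fold in B projects to the two independent folds
theorem foldB_eq (graph : List (String × String × String)) (topics : PySem.Set String) (relation : String)
    (p : PySem.Set String × PySem.Dict String Int) :
    graph.foldl (fun st x =>
      (PySem.Set.add (PySem.Set.add st.1 x.1) x.2.2,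
       if x.2.1 == relation && PySem.Set.contains topics x.1 then
         st.2.insert x.2.2 (st.2.getD x.2.2 0 + 1)
       else st.2)) p =
    (graph.foldl (fun s x => PySem.Set.add (PySem.Set.add s x.1) x.2.2) p.1,
     graph.foldl (fun d x =>
        if x.2.1 == relation && PySem.Set.contains topics x.1 then
          d.insert x.2.2 (d.getD x.2.2 0 + 1)
        else d) p.2) := by
  induction graph generalizing p with
  | nil => rfl
  | cons y ys ih =>
      simp only [List.foldl_cons]
      exact ih _

-- counting e in the mapped filtered list is a countP over the graph
theorem countP_eq_count (graph : List (String × String × String)) (q : String × String × String → Bool) (e : String) :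
    ((graph.filter q).map (·.2.2)).count e = graph.countP (fun y => q y && y.2.2 == e) := by
  induction graph with
  | nil => rfl
  | cons y ys ih =>
      simp only [List.filter_cons, List.countP_cons]
      by_cases hq : q y = true
      · rw [if_pos hq]
        simp only [List.map_cons, List.count_cons, ih, hq, Bool.true_and]
      · rw [if_neg hq]
        simp [ih, hq]

-- membership in the deduplicated topic set is membership in the original list
theorem topics_contains (topic_entities : List String) (x : String) :
    PySem.Set.contains (PySem.Set.ofList topic_entities) x = topic_entities.contains x := by
  by_cases h : x ∈ topic_entities <;>
    simp [PySem.Set.mem_ofList, h]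

-- the final "len == 1 and first element == answer" test, in A's and B's shapes
theorem final_eq (L : List String) (answer : String) :
    (if L.length == 1 then
      match PySem.List.pyGet? L 0 with
      | some a0 => a0 == answer
      | none => false
    else false) = (L.length == 1 && (L.headD "" == answer)) := by
  match L with
  | [] => rfl
  | [a] => simp [PySem.List.pyGet?, PySem.List.pyIdx?]
  | a :: b :: t => simp

-- final test through one dedup of a nodup list
theorem final_eq' (M : List String) (h : M.Nodup) (answer : String) :
    (if (PySem.Set.ofList M).length == 1 then
      match PySem.List.pyGet? (PySem.Set.ofList M) 0 with
      | some a0 => a0 == answer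
      | none => false
    else false) = (M.length == 1 && (M.headD "" == answer)) := by
  rw [PySem.Set.ofList_eq_self_of_nodup M h]
  exact final_eq M answer

theorem check_single_eq (graph : List (String × String × String)) (answer : String) (topic_entities : List String) (relation : String) :
    check_single graph answer topic_entities relation = check_single_alt graph answer topic_entities relation := by
  have hES : PySem.Set.ofList (graph.foldl (fun acc x => acc ++ [x.1] ++ [x.2.2]) []) =
      graph.foldl (fun s x => PySem.Set.add (PySem.Set.add s x.1) x.2.2) PySem.Set.empty := by
    rw [show (fun acc (x : String × String × String) => acc ++ [x.1] ++ [x.2.2]) = (fun acc x => acc ++ ([x.1] ++ [x.2.2])) by funext a b; simp,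
        PySem.List.foldl_append_eq_flatMap, List.nil_append, ← ents_eq graph PySem.Set.empty,
        PySem.Set.update_empty]
  simp only [check_single, check_single_alt, foldB_eq]
  rw [PySem.List.foldl_append_if_eq_filter, List.nil_append, ← hES]
  have hpred : ∀ e ∈ PySem.Set.ofList (graph.foldl (fun acc x => acc ++ [x.1] ++ [x.2.2]) []),
      ((graph.foldl (fun cnt y =>
        if y.2.2 ≠ e then cnt
        else if topic_entities.contains y.1 && y.2.1 == relation then cnt + 1 else cnt) (0:Int)) == (topic_entities.length : Int)) =
      ((graph.foldl (fun d x =>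
        if x.2.1 == relation && PySem.Set.contains (PySem.Set.ofList topic_entities) x.1 then
          d.insert x.2.2 (d.getD x.2.2 0 + 1)
        else d) PySem.Dict.empty).getD e 0 == (topic_entities.length : Int)) := by
    intro e _
    rw [cntA_eq, cntB_eq, PySem.Dict.getD_empty, zero_add, zero_add, countP_eq_count]
    simp only [topics_contains]
  rw [List.filter_congr hpred]
  exact final_eq' _ (List.Nodup.filter _ (PySem.Set.nodup_ofList _)) answer

-- ===== VERDICT (by name: the statement is the Claim_ definition above) =====
theorem check_single_spec : Claim_equal_check_single := by
  intro graph answer topic_entities relation _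
  unfold Spec_check_single
  exact check_single_eq graph answer topic_entities relation
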